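-- pv_equiv track=rewrite | github.com/wzygxr/shuati | class117_ManacherAlgorithm/Code05_LongestDoublePalindrome.py | longest_double_palindrome
-- ===== SOURCE A (Python) =====
-- def longest_double_palindrome(s):
--     """
--     计算最长双回文串长度
--
--     时间复杂度: O(n)
--     空间复杂度: O(n)
--
--     :param s: 输入字符串
--     :return: 最长双回文串长度
--     """
--     n = len(s)
--     if n <= 1:
--         return 0
--
--     # 预处理字符串
--     processed = "#" + "#".join(s) + "#"
--     m = len(processed)
--
--     # Manacher算法
--     p = [0] * m
--     center = right = 0
--
--     for i in range(m):
--         if i < right: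
--             mirror = 2 * center - i
--             p[i] = min(right - i, p[mirror])
--
--         # 尝试扩展回文串
--         while (i + p[i] + 1 < m and
--                i - p[i] - 1 >= 0 and
--                processed[i + p[i] + 1] == processed[i - p[i] - 1]):
--             p[i] += 1
--
--         if i + p[i] > right:
--             center = i
--             right = i + p[i]
--
--     # 计算向左的最长回文半径（以每个位置为右边界的最长回文半径）
--     left = [0] * m
--     max_right = 0
--     for i in range(m):
--         if i + p[i] > max_right:
--             for j in range(max_right + 1, i + p[i] + 1):
--                 if j < m:
--                     left[j] = j - i
--             max_right = i + p[i]
--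
--     # 计算向右的最长回文半径（以每个位置为左边界的最长回文半径）
--     right_arr = [0] * m
--     min_left = m - 1
--     for i in range(m - 1, -1, -1):
--         if i - p[i] < min_left:
--             for j in range(min_left - 1, i - p[i] - 1, -1):
--                 if j >= 0:
--                     right_arr[j] = i - j
--             min_left = i - p[i]
--
--     # 找到最大的left[i] + right[i]（在原字符串的位置上）
--     ans = 0
--     for i in range(1, m - 1, 2):  # 只处理原字符串字符位置
--         if left[i] > 0 and right_arr[i] > 0:
--             ans = max(ans, left[i] + right_arr[i])
--
--     return ans
-- ===== SOURCE B (Python) =====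
-- def longest_double_palindrome(s):
--     """Longest double palindrome length: expand-around-center radii plus a
--     per-boundary nearest-covering-center search instead of Manacher + amortized fills."""
--     n = len(s)
--     if n <= 1:
--         return 0
--     proc = "#" + "#".join(s) + "#"
--     m = len(proc)
--
--     # maximal palindrome radius at every center, by direct expansion
--     rad = []
--     for c in range(m):
--         r = 0
--         while c - r - 1 >= 0 and c + r + 1 < m and proc[c - r - 1] == proc[c + r + 1]:
--             r += 1
--         rad.append(r)
--
--     # left[j] = longest palindrome radius with right boundary j
--     #         = j - (smallest center whose palindrome reaches j)
--     left = []
--     for j in range(m):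
--         c = 0
--         while c + rad[c] < j:
--             c += 1
--         left.append(j - c)
--
--     # right_arr[j] = longest palindrome radius with left boundary j
--     #             = (largest center whose palindrome reaches back to j) - j
--     right_arr = []
--     for j in range(m):
--         c = m - 1
--         while c - rad[c] > j:
--             c -= 1
--         right_arr.append(c - j)
--
--     cands = [left[i] + right_arr[i] for i in range(1, m - 1, 2)
--              if left[i] > 0 and right_arr[i] > 0]
--     return max(cands) if cands else 0
-- ===== Notes on version B (the rewrite author's own statement) =====
-- stated objective: alternative
-- what changed: Replaces Manacher's mirror-based linear radius computation and the two amortized boundary-fill sweeps by naive expand-around-center radii plus, for each boundary position, a direct linear search for the nearest/farthest covering center.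
import Mathlib
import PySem

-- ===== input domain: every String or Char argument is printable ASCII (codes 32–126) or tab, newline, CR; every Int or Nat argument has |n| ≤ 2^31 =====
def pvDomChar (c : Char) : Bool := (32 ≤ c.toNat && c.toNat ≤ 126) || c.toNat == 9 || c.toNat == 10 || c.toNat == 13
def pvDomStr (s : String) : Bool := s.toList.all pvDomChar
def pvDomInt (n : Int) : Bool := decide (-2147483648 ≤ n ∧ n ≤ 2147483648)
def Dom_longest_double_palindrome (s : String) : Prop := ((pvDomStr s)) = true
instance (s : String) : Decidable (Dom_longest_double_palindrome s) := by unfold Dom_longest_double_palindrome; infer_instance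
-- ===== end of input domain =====

-- B replaces Manacher's linear-time radii and amortized boundary fills by naive
-- expand-around-center radii plus a direct per-boundary search for the covering center
-- (alternative decomposition; not faster).

-- ===== PORT A =====

-- processed = "#" + "#".join(s) + "#"  (exact for the nonempty strings that reach it)
def pvProcessed (s : String) : List Char :=
  '#' :: (s.toList.flatMap (fun c => [c, '#']))

-- the `while` expansion loop of A: conditions in Python's order (i+p+1 < m, i-p-1 >= 0, chars equal)
def pvExpandA (l : List Char) (m i p : Nat) : Nat :=
  if h : i + p + 1 < m ∧ p + 1 ≤ i ∧ l.getD (i + p + 1) ' ' = l.getD (i - p - 1) ' ' then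
    pvExpandA l m i (p + 1)
  else p
termination_by m - p
decreasing_by omega

-- one iteration of A's Manacher loop; mirror = 2*center - i is never negative when i < right
def pvManStep (l : List Char) (m : Nat) (st : List Nat × Nat × Nat) (i : Nat) :
    List Nat × Nat × Nat :=
  let pl := st.1
  let center := st.2.1
  let right := st.2.2
  let p0 := if i < right then min (right - i) (pl.getD (2 * center - i) 0) else 0
  let pi := pvExpandA l m i p0
  let pl' := pl.set i pi
  if right < i + pi then (pl', i, i + pi) else (pl', center, right)

def pvManacher (l : List Char) (m : Nat) : List Nat :=
  ((List.range m).foldl (pvManStep l m) (List.replicate m 0, 0, 0)).1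

-- left[] fill: for i in range(m): if i+p[i] > max_right: for j in range(max_right+1, i+p[i]+1): if j < m: left[j] = j-i
def pvLeftFill (m : Nat) (pArr : List Nat) : List Nat :=
  ((List.range m).foldl (fun st i =>
      let pi := pArr.getD i 0
      if st.2 < i + pi then
        (((List.range' (st.2 + 1) (i + pi - st.2)).foldl
            (fun L j => if j < m then L.set j (j - i) else L) st.1), i + pi)
      else st)
    (List.replicate m 0, 0)).1

-- right_arr[] fill: for i in range(m-1,-1,-1): if i-p[i] < min_left: for j in range(min_left-1, i-p[i]-1, -1): right_arr[j] = i-j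
-- (Python's `if j >= 0` guard is vacuously true: j ≥ i - p[i] ≥ 0)
def pvRightFill (m : Nat) (pArr : List Nat) : List Nat :=
  (((List.range m).reverse).foldl (fun st i =>
      let pi := pArr.getD i 0
      if i - pi < st.2 then
        ((((List.range' (i - pi) (st.2 - (i - pi))).reverse).foldl
            (fun L j => L.set j (i - j)) st.1), i - pi)
      else st)
    (List.replicate m 0, m - 1)).1

def longest_double_palindrome (s : String) : Int :=
  let n := s.toList.length
  if n ≤ 1 then 0
  else
    let l := pvProcessed s
    let m := l.length
    let pArr := pvManacher l m
    let left := pvLeftFill m pArr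
    let ra := pvRightFill m pArr
    -- for i in range(1, m-1, 2): if left[i] > 0 and right_arr[i] > 0: ans = max(ans, left[i]+right_arr[i])
    let ans := (List.range' 1 ((m - 1) / 2) 2).foldl
      (fun a i =>
        if 0 < left.getD i 0 ∧ 0 < ra.getD i 0 then max a (left.getD i 0 + ra.getD i 0)
        else a) 0
    (ans : Int)

-- ===== PORT B =====

-- B's `while` expansion: conditions in Source B's order (c-r-1 >= 0, c+r+1 < m, chars equal)
def pvExpandB (l : List Char) (m c r : Nat) : Nat :=
  if h : r + 1 ≤ c ∧ c + r + 1 < m ∧ l.getD (c - r - 1) ' ' = l.getD (c + r + 1) ' ' then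
    pvExpandB l m c (r + 1)
  else r
termination_by m - r
decreasing_by omega

-- while c + rad[c] < j: c += 1
def pvFindL (rad : List Nat) (j c : Nat) : Nat :=
  if h : c + rad.getD c 0 < j then pvFindL rad j (c + 1) else c
termination_by j - c
decreasing_by omega

-- while c - rad[c] > j: c -= 1
def pvFindR (rad : List Nat) (j c : Nat) : Nat :=
  if h : j < c - rad.getD c 0 then pvFindR rad j (c - 1) else c
termination_by c
decreasing_by omega

def longest_double_palindrome_alt (s : String) : Int :=
  let n := s.toList.length
  if n ≤ 1 then 0
  else
    let l := pvProcessed s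
    let m := l.length
    let rad := (List.range m).map (fun c => pvExpandB l m c 0)
    let left := (List.range m).map (fun j => j - pvFindL rad j 0)
    let ra := (List.range m).map (fun j => pvFindR rad j (m - 1) - j)
    let cands := (List.range' 1 ((m - 1) / 2) 2).filterMap
      (fun i =>
        if 0 < left.getD i 0 ∧ 0 < ra.getD i 0 then some (left.getD i 0 + ra.getD i 0)
        else none)
    match cands with
    | [] => (0 : Int)
    | h :: t => ((t.foldl max h : Nat) : Int)

-- ===== PRECONDITION & SPEC =====
def Spec_longest_double_palindrome (s : String) (out : Int) : Prop := out = longest_double_palindrome_alt s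
instance (s : String) (out : Int) : Decidable (Spec_longest_double_palindrome s out) := by unfold Spec_longest_double_palindrome; infer_instance

-- ===== CLAIM (what is proved, stated in full; the proofs are below) =====
def Claim_equal_longest_double_palindrome : Prop := ∀ (s : String), Dom_longest_double_palindrome s → Spec_longest_double_palindrome s (longest_double_palindrome s)

-- ===== LEMMAS AND PROOFS =====

-- palindromic-extension condition at center i, offset k (next pair to check)
def pvC (l : List Char) (i k : Nat) : Prop :=
  i + k + 1 < l.length ∧ k + 1 ≤ i ∧ l.getD (i + k + 1) ' ' = l.getD (i - k - 1) ' '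

def pvRad (l : List Char) (i : Nat) : Nat := pvExpandA l l.length i 0

lemma pvExpandA_char (l : List Char) (i : Nat) :
    ∀ p, (∀ k, k < p → pvC l i k) →
    (∀ k, k < pvExpandA l l.length i p → pvC l i k) ∧ ¬ pvC l i (pvExpandA l l.length i p) := by
  intro p
  fun_induction pvExpandA l l.length i p with
  | case1 p h ih =>
    intro hp
    refine ih ?_
    intro k hk
    rcases Nat.lt_or_ge k p with h'|h'
    · exact hp k h'
    · have : k = p := by omega
      subst this; exact h
  | case2 p h =>
    intro hp
    exact ⟨hp, h⟩

lemma pvC_unique (l : List Char) (i a b : Nat)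
    (ha1 : ∀ k, k < a → pvC l i k) (ha2 : ¬ pvC l i a)
    (hb1 : ∀ k, k < b → pvC l i k) (hb2 : ¬ pvC l i b) : a = b := by
  rcases Nat.lt_trichotomy a b with h|h|h
  · exact absurd (hb1 a h) ha2
  · exact h
  · exact absurd (ha1 b h) hb2

lemma pvRad_char (l : List Char) (i : Nat) :
    (∀ k, k < pvRad l i → pvC l i k) ∧ ¬ pvC l i (pvRad l i) :=
  pvExpandA_char l i 0 (by omega)

lemma pvExpandA_eq_rad (l : List Char) (i p : Nat) (hp : ∀ k, k < p → pvC l i k) :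
    pvExpandA l l.length i p = pvRad l i := by
  have h := pvExpandA_char l i p hp
  exact pvC_unique l i _ _ h.1 h.2 (pvRad_char l i).1 (pvRad_char l i).2

lemma pvExpandB_char (l : List Char) (i : Nat) :
    ∀ p, (∀ k, k < p → pvC l i k) →
    (∀ k, k < pvExpandB l l.length i p → pvC l i k) ∧ ¬ pvC l i (pvExpandB l l.length i p) := by
  intro p
  fun_induction pvExpandB l l.length i p with
  | case1 p h ih =>
    intro hp
    refine ih ?_
    intro k hk
    rcases Nat.lt_or_ge k p with h'|h'
    · exact hp k h'
    · have : k = p := by omega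
      subst this; exact ⟨h.2.1, h.1, h.2.2.symm⟩
  | case2 p h =>
    intro hp
    refine ⟨hp, fun hc => h ⟨hc.2.1, hc.1, hc.2.2.symm⟩⟩

lemma pvExpandB_eq_rad (l : List Char) (i : Nat) : pvExpandB l l.length i 0 = pvRad l i := by
  have h := pvExpandB_char l i 0 (by omega)
  exact pvC_unique l i _ _ h.1 h.2 (pvRad_char l i).1 (pvRad_char l i).2

lemma pvRad_le (l : List Char) (i : Nat) : pvRad l i ≤ i := by
  rcases Nat.eq_zero_or_pos (pvRad l i) with h|h
  · omega
  · have := (pvRad_char l i).1 (pvRad l i - 1) (by omega)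
    have := this.2.1
    omega

lemma pvRad_add_lt (l : List Char) (i : Nat) (hi : i < l.length) :
    i + pvRad l i < l.length := by
  rcases Nat.eq_zero_or_pos (pvRad l i) with h|h
  · omega
  · have := (pvRad_char l i).1 (pvRad l i - 1) (by omega)
    have := this.1
    omega

lemma pvRad_sym (l : List Char) (i d : Nat) (h1 : 1 ≤ d) (h2 : d ≤ pvRad l i) :
    l.getD (i + d) ' ' = l.getD (i - d) ' ' := by
  have h := (pvRad_char l i).1 (d - 1) (by omega)
  have e1 : i + (d - 1) + 1 = i + d := by omega
  have e2 : i - (d - 1) - 1 = i - d := by omega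
  unfold pvC at h
  rw [e1, e2] at h
  exact h.2.2

-- the Manacher mirror bound: the initial radius min(right - i, p[mirror]) never exceeds the true radius
lemma pvGoodInit (l : List Char) (c i : Nat) (hi : i < l.length) (hc : c < i)
    (hir : i < c + pvRad l c) :
    ∀ k, k < min (c + pvRad l c - i) (pvRad l (2 * c - i)) → pvC l i k := by
  intro k hk
  have hk1 : k < c + pvRad l c - i := lt_of_lt_of_le hk (min_le_left _ _)
  have hk2 : k < pvRad l (2 * c - i) := lt_of_lt_of_le hk (min_le_right _ _)
  have hrc_le : pvRad l c ≤ c := pvRad_le l c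
  have hrm_le : pvRad l (2 * c - i) ≤ 2 * c - i := pvRad_le l (2 * c - i)
  have hcm : c + pvRad l c < l.length := pvRad_add_lt l c (by omega)
  refine ⟨by omega, by omega, ?_⟩
  -- step 1: mirror the pair (i+k+1, ·) through center c
  have s1 : l.getD (i + k + 1) ' ' = l.getD ((2 * c - i) - (k + 1)) ' ' := by
    have h := pvRad_sym l c (i + k + 1 - c) (by omega) (by omega)
    have e1 : c + (i + k + 1 - c) = i + k + 1 := by omega
    have e2 : c - (i + k + 1 - c) = (2 * c - i) - (k + 1) := by omega
    rw [e1, e2] at h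
    exact h
  -- step 2: the palindrome at the mirror
  have s2 : l.getD ((2 * c - i) - (k + 1)) ' ' = l.getD ((2 * c - i) + (k + 1)) ' ' := by
    exact (pvRad_sym l (2 * c - i) (k + 1) (by omega) (by omega)).symm
  -- step 3: mirror the pair (·, i-k-1) back through center c
  have s3 : l.getD ((2 * c - i) + (k + 1)) ' ' = l.getD (i - k - 1) ' ' := by
    rcases Nat.lt_trichotomy (k + 1) (i - c) with h|h|h
    · have hsym := pvRad_sym l c (i - c - (k + 1)) (by omega) (by omega)
      have e1 : c + (i - c - (k + 1)) = i - k - 1 := by omega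
      have e2 : c - (i - c - (k + 1)) = (2 * c - i) + (k + 1) := by omega
      rw [e1, e2] at hsym
      exact hsym.symm
    · have e1 : (2 * c - i) + (k + 1) = c := by omega
      have e2 : i - k - 1 = c := by omega
      rw [e1, e2]
    · have hsym := pvRad_sym l c (c + (k + 1) - i) (by omega) (by omega)
      have e1 : c + (c + (k + 1) - i) = (2 * c - i) + (k + 1) := by omega
      have e2 : c - (c + (k + 1) - i) = i - k - 1 := by omega
      rw [e1, e2] at hsym
      exact hsym
  rw [s1, s2, s3]

lemma pvGetD_set (L : List Nat) (i j v : Nat) :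
    (L.set i v).getD j 0 = if i = j ∧ i < L.length then v else L.getD j 0 := by
  simp only [List.getD_eq_getElem?_getD, List.getElem?_set]
  by_cases hij : i = j
  · subst hij
    by_cases hlt : i < L.length
    · simp [hlt]
    · simp [hlt]
  · simp [hij]

lemma pvRad_zero (l : List Char) : pvRad l 0 = 0 := by
  unfold pvRad
  rw [pvExpandA]
  simp

lemma pvManStep_inv (l : List Char) (pl : List Nat) (c r n : Nat) (hn : n < l.length)
    (hlen : pl.length = l.length)
    (hvals : ∀ j, j < n → pl.getD j 0 = pvRad l j)
    (hright : r = c + pvRad l c)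
    (hcen : c = 0 ∨ c < n) :
    (pvManStep l l.length (pl, c, r) n).1.length = l.length ∧
    (∀ j, j < n + 1 → (pvManStep l l.length (pl, c, r) n).1.getD j 0 = pvRad l j) ∧
    (pvManStep l l.length (pl, c, r) n).2.2
      = (pvManStep l l.length (pl, c, r) n).2.1 + pvRad l (pvManStep l l.length (pl, c, r) n).2.1 ∧
    ((pvManStep l l.length (pl, c, r) n).2.1 = 0 ∨ (pvManStep l l.length (pl, c, r) n).2.1 < n + 1) := by
  have hpi : pvExpandA l l.length n
      (if n < r then min (r - n) (pl.getD (2 * c - n) 0) else 0) = pvRad l n := by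
    by_cases hnr : n < r
    · rw [if_pos hnr]
      have hc : c < n := by
        rcases hcen with h0|h
        · exfalso; rw [h0, pvRad_zero] at hright; omega
        · exact h
      subst hright
      have hrc : pvRad l c ≤ c := pvRad_le l c
      have hm : (2 * c - n) < n := by omega
      apply pvExpandA_eq_rad
      intro k hk
      rw [hvals (2 * c - n) hm] at hk
      exact pvGoodInit l c n hn hc hnr k hk
    · rw [if_neg hnr]
      exact pvExpandA_eq_rad l n 0 (fun k hk => absurd hk (by omega))
  have hset : ∀ j, j < n + 1 → (pl.set n (pvRad l n)).getD j 0 = pvRad l j := by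
    intro j hj
    rw [pvGetD_set]
    rcases Nat.lt_or_ge j n with h|h
    · rw [if_neg (by omega), hvals _ h]
    · have : j = n := by omega
      subst this
      rw [if_pos ⟨rfl, by omega⟩]
  simp only [pvManStep, hpi]
  by_cases hupd : r < n + pvRad l n
  · rw [if_pos hupd]
    exact ⟨by simp [hlen], hset, rfl, Or.inr (by show n < n + 1; omega)⟩
  · rw [if_neg hupd]
    refine ⟨by simp [hlen], hset, ?_, ?_⟩
    · show r = c + pvRad l c
      exact hright
    · show c = 0 ∨ c < n + 1
      omega

def pvManSt (l : List Char) (n : Nat) : List Nat × Nat × Nat :=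
  (List.range n).foldl (pvManStep l l.length) (List.replicate l.length 0, 0, 0)

lemma pvManSt_succ (l : List Char) (n : Nat) :
    pvManSt l (n + 1) = pvManStep l l.length (pvManSt l n) n := by
  unfold pvManSt
  rw [List.range_succ, List.foldl_append]
  rfl

lemma pvManInv (l : List Char) (n : Nat) (hn : n ≤ l.length) :
    (pvManSt l n).1.length = l.length ∧
    (∀ j, j < n → (pvManSt l n).1.getD j 0 = pvRad l j) ∧
    (pvManSt l n).2.2 = (pvManSt l n).2.1 + pvRad l (pvManSt l n).2.1 ∧
    ((pvManSt l n).2.1 = 0 ∨ (pvManSt l n).2.1 < n) := by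
  induction n with
  | zero =>
    refine ⟨by simp [pvManSt], fun j hj => absurd hj (by omega), ?_, Or.inl ?_⟩
    · show (0 : Nat) = 0 + pvRad l 0
      rw [pvRad_zero]
    · rfl
  | succ n ih =>
    obtain ⟨hlen, hvals, hright, hcen⟩ := ih (by omega)
    rw [pvManSt_succ]
    exact pvManStep_inv l (pvManSt l n).1 (pvManSt l n).2.1 (pvManSt l n).2.2 n (by omega)
      hlen hvals hright hcen

lemma pvManacher_getD (l : List Char) (j : Nat) (hj : j < l.length) :
    (pvManacher l l.length).getD j 0 = pvRad l j := by
  have h := pvManInv l l.length (le_refl _)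
  exact h.2.1 j hj

-- proof-side search functions (same recursion as pvFindL/pvFindR but reading pvRad directly)
def pvFL (l : List Char) (j c : Nat) : Nat :=
  if h : c + pvRad l c < j then pvFL l j (c + 1) else c
termination_by j - c
decreasing_by omega

def pvFR (l : List Char) (j c : Nat) : Nat :=
  if h : j < c - pvRad l c then pvFR l j (c - 1) else c
termination_by c
decreasing_by omega

lemma pvFL_spec (l : List Char) (j c : Nat) :
    c ≤ pvFL l j c ∧ j ≤ pvFL l j c + pvRad l (pvFL l j c) ∧
    (∀ x, c ≤ x → x < pvFL l j c → x + pvRad l x < j) := by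
  fun_induction pvFL l j c with
  | case1 c h ih =>
    refine ⟨by omega, ih.2.1, ?_⟩
    intro x hx1 hx2
    rcases Nat.lt_or_ge x (c + 1) with h'|h'
    · have : x = c := by omega
      subst this; exact h
    · exact ih.2.2 x h' hx2
  | case2 c h => exact ⟨le_refl c, by omega, fun x hx1 hx2 => absurd hx1 (by omega)⟩

lemma pvFL_eq (l : List Char) (j c q : Nat) (h1 : c ≤ q)
    (h2 : j ≤ q + pvRad l q) (h3 : ∀ x, c ≤ x → x < q → x + pvRad l x < j) :
    pvFL l j c = q := by
  have hs := pvFL_spec l j c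
  rcases Nat.lt_trichotomy (pvFL l j c) q with h|h|h
  · have := h3 (pvFL l j c) hs.1 h
    omega
  · exact h
  · have := hs.2.2 q h1 h
    omega

lemma pvFR_spec (l : List Char) (j c : Nat) :
    pvFR l j c ≤ c ∧ pvFR l j c - pvRad l (pvFR l j c) ≤ j ∧
    (∀ x, x ≤ c → pvFR l j c < x → j < x - pvRad l x) := by
  fun_induction pvFR l j c with
  | case1 c h ih =>
    refine ⟨by omega, ih.2.1, ?_⟩
    intro x hx1 hx2
    rcases Nat.lt_or_ge (c - 1) x with h'|h'
    · have : x = c := by omega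
      subst this; exact h
    · exact ih.2.2 x h' hx2
  | case2 c h => exact ⟨le_refl c, by omega, fun x hx1 hx2 => absurd hx1 (by omega)⟩

lemma pvFR_eq (l : List Char) (j c q : Nat) (h1 : q ≤ c)
    (h2 : q - pvRad l q ≤ j) (h3 : ∀ x, x ≤ c → q < x → j < x - pvRad l x) :
    pvFR l j c = q := by
  have hs := pvFR_spec l j c
  rcases Nat.lt_trichotomy (pvFR l j c) q with h|h|h
  · have := hs.2.2 q h1 h
    omega
  · exact h
  · have := h3 (pvFR l j c) hs.1 h
    omega

-- bridges: B's searches over the rad array agree with the proof-side searches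
lemma pvFindL_spec (rad : List Nat) (j c : Nat) :
    c ≤ pvFindL rad j c ∧ j ≤ pvFindL rad j c + rad.getD (pvFindL rad j c) 0 ∧
    (∀ x, c ≤ x → x < pvFindL rad j c → x + rad.getD x 0 < j) := by
  fun_induction pvFindL rad j c with
  | case1 c h ih =>
    refine ⟨by omega, ih.2.1, ?_⟩
    intro x hx1 hx2
    rcases Nat.lt_or_ge x (c + 1) with h'|h'
    · have : x = c := by omega
      subst this; exact h
    · exact ih.2.2 x h' hx2
  | case2 c h => exact ⟨le_refl c, by omega, fun x hx1 hx2 => absurd hx1 (by omega)⟩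

lemma pvFindR_spec (rad : List Nat) (j c : Nat) :
    pvFindR rad j c ≤ c ∧ pvFindR rad j c - rad.getD (pvFindR rad j c) 0 ≤ j ∧
    (∀ x, x ≤ c → pvFindR rad j c < x → j < x - rad.getD x 0) := by
  fun_induction pvFindR rad j c with
  | case1 c h ih =>
    refine ⟨by omega, ih.2.1, ?_⟩
    intro x hx1 hx2
    rcases Nat.lt_or_ge (c - 1) x with h'|h'
    · have : x = c := by omega
      subst this; exact h
    · exact ih.2.2 x h' hx2
  | case2 c h => exact ⟨le_refl c, by omega, fun x hx1 hx2 => absurd hx1 (by omega)⟩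

lemma pvFindL_eq_pvFL (l : List Char) (rad : List Nat)
    (hra : ∀ x, x < l.length → rad.getD x 0 = pvRad l x) (j : Nat) (hj : j < l.length) :
    pvFindL rad j 0 = pvFL l j 0 := by
  have hs := pvFindL_spec rad j 0
  have hle : pvFindL rad j 0 ≤ j := by
    by_contra hgt
    have := hs.2.2 j (by omega) (by omega)
    rw [hra j hj] at this
    omega
  apply (pvFL_eq l j 0 (pvFindL rad j 0) (by omega) ?_ ?_).symm
  · rw [← hra _ (by omega)]
    exact hs.2.1
  · intro x hx1 hx2
    have := hs.2.2 x hx1 hx2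
    rw [hra x (by omega)] at this
    exact this

-- running maximum of i + rad i over processed prefixes (A's max_right)
def pvMR (l : List Char) : Nat → Nat
  | 0 => 0
  | n + 1 => max (pvMR l n) (n + pvRad l n)

lemma pvMR_ge (l : List Char) (x : Nat) : ∀ n, x < n → x + pvRad l x ≤ pvMR l n := by
  intro n
  induction n with
  | zero => omega
  | succ n ih =>
    intro h
    rcases Nat.lt_or_ge x n with h'|h'
    · exact le_trans (ih h') (by simp [pvMR])
    · have : x = n := by omega
      subst this
      simp [pvMR]

lemma pvSetFoldL (mm : Nat) (v : Nat → Nat) :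
    ∀ (len a : Nat) (L : List Nat), L.length = mm →
    (((List.range' a len).foldl (fun L j => if j < mm then L.set j (v j) else L) L).length = mm ∧
     ∀ j, ((List.range' a len).foldl (fun L j => if j < mm then L.set j (v j) else L) L).getD j 0
       = if a ≤ j ∧ j < a + len ∧ j < mm then v j else L.getD j 0) := by
  intro len
  induction len with
  | zero =>
    intro a L hL
    refine ⟨hL, fun j => ?_⟩
    rw [if_neg (by omega)]
    rfl
  | succ len ih =>
    intro a L hL
    rw [List.range'_succ]
    simp only [List.foldl_cons]
    have hL' : (if a < mm then L.set a (v a) else L).length = mm := by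
      split_ifs <;> simp [hL]
    obtain ⟨ihlen, ihval⟩ := ih (a + 1) _ hL'
    refine ⟨ihlen, fun j => ?_⟩
    rw [ihval j]
    by_cases hja : j = a
    · subst hja
      rw [if_neg (show ¬(j + 1 ≤ j ∧ j < j + 1 + len ∧ j < mm) by omega)]
      by_cases hm : j < mm
      · rw [if_pos hm, pvGetD_set, if_pos ⟨rfl, by omega⟩,
          if_pos (show j ≤ j ∧ j < j + (len + 1) ∧ j < mm by omega)]
      · rw [if_neg hm, if_neg (show ¬(j ≤ j ∧ j < j + (len + 1) ∧ j < mm) by omega)]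
    · by_cases hin : a + 1 ≤ j ∧ j < a + 1 + len ∧ j < mm
      · rw [if_pos hin, if_pos (show a ≤ j ∧ j < a + (len + 1) ∧ j < mm by omega)]
      · rw [if_neg hin,
          if_neg (show ¬(a ≤ j ∧ j < a + (len + 1) ∧ j < mm) by omega)]
        split_ifs with h
        · rw [pvGetD_set, if_neg (by omega)]
        · rfl

lemma pvSetFoldR (v : Nat → Nat) :
    ∀ (len a : Nat) (L : List Nat), a + len ≤ L.length →
    ((((List.range' a len).reverse).foldl (fun L j => L.set j (v j)) L).length = L.length ∧
     ∀ j, (((List.range' a len).reverse).foldl (fun L j => L.set j (v j)) L).getD j 0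
       = if a ≤ j ∧ j < a + len then v j else L.getD j 0) := by
  intro len
  induction len with
  | zero =>
    intro a L hL
    refine ⟨rfl, fun j => ?_⟩
    rw [if_neg (by omega)]
    rfl
  | succ len ih =>
    intro a L hL
    rw [List.range'_1_concat, List.reverse_append]
    simp only [List.reverse_cons, List.reverse_nil, List.nil_append, List.singleton_append,
      List.foldl_cons]
    have hL' : (L.set (a + len) (v (a + len))).length = L.length := by simp
    obtain ⟨ihlen, ihval⟩ := ih a (L.set (a + len) (v (a + len))) (by rw [hL']; omega)
    refine ⟨by rw [ihlen, hL'], fun j => ?_⟩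
    rw [ihval j]
    by_cases hin : a ≤ j ∧ j < a + len
    · rw [if_pos hin, if_pos ⟨hin.1, by omega⟩]
    · rw [if_neg hin]
      by_cases hja : j = a + len
      · subst hja
        rw [if_pos ⟨by omega, by omega⟩, pvGetD_set, if_pos ⟨rfl, by omega⟩]
      · rw [if_neg (by omega), pvGetD_set, if_neg (by omega)]

def pvLSt (l : List Char) (pArr : List Nat) (n : Nat) : List Nat × Nat :=
  (List.range n).foldl (fun st i =>
      let pi := pArr.getD i 0
      if st.2 < i + pi then
        (((List.range' (st.2 + 1) (i + pi - st.2)).foldl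
            (fun L j => if j < l.length then L.set j (j - i) else L) st.1), i + pi)
      else st)
    (List.replicate l.length 0, 0)

lemma pvLSt_eq_leftFill (l : List Char) (pArr : List Nat) :
    pvLeftFill l.length pArr = (pvLSt l pArr l.length).1 := rfl

lemma pvLSt_succ (l : List Char) (pArr : List Nat) (n : Nat) :
    pvLSt l pArr (n + 1)
      = (if (pvLSt l pArr n).2 < n + pArr.getD n 0 then
          (((List.range' ((pvLSt l pArr n).2 + 1) (n + pArr.getD n 0 - (pvLSt l pArr n).2)).foldl
              (fun L j => if j < l.length then L.set j (j - n) else L) (pvLSt l pArr n).1),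
            n + pArr.getD n 0)
        else pvLSt l pArr n) := by
  unfold pvLSt
  rw [List.range_succ, List.foldl_append]
  rfl

lemma pvLeftFill_inv (l : List Char) (pArr : List Nat)
    (hpa : ∀ x, x < l.length → pArr.getD x 0 = pvRad l x) :
    ∀ n, n ≤ l.length →
    (pvLSt l pArr n).1.length = l.length ∧ (pvLSt l pArr n).2 = pvMR l n ∧
    ∀ j, j < l.length → (pvLSt l pArr n).1.getD j 0
      = if 1 ≤ j ∧ j ≤ pvMR l n then j - pvFL l j 0 else 0 := by
  intro n
  induction n with
  | zero =>
    intro _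
    refine ⟨by simp [pvLSt], rfl, fun j hj => ?_⟩
    rw [if_neg (by simp [pvMR]; omega)]
    simp [pvLSt]
  | succ n ih =>
    intro hn
    obtain ⟨hlen, hmr, hval⟩ := ih (by omega)
    have hrad : pArr.getD n 0 = pvRad l n := hpa n (by omega)
    have hMR1 : pvMR l (n + 1) = max (pvMR l n) (n + pvRad l n) := rfl
    rw [pvLSt_succ]
    by_cases hcase : (pvLSt l pArr n).2 < n + pArr.getD n 0
    · rw [if_pos hcase]
      rw [hrad] at hcase
      rw [hmr] at hcase
      obtain ⟨hsflen, hsfval⟩ := pvSetFoldL l.length (fun j => j - n)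
        (n + pArr.getD n 0 - (pvLSt l pArr n).2) ((pvLSt l pArr n).2 + 1) (pvLSt l pArr n).1 hlen
      refine ⟨hsflen, by rw [hrad, hMR1]; omega, fun j hj => ?_⟩
      rw [hsfval j]
      rw [hrad, hmr] at *
      by_cases hwin : pvMR l n + 1 ≤ j ∧ j < pvMR l n + 1 + (n + pvRad l n - pvMR l n) ∧ j < l.length
      · rw [if_pos hwin]
        have hFL : pvFL l j 0 = n := by
          apply pvFL_eq l j 0 n (by omega) (by omega)
          intro x _ hx
          have := pvMR_ge l x n hx
          omega
        rw [if_pos (by omega : 1 ≤ j ∧ j ≤ pvMR l (n + 1)), hFL]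
      · rw [if_neg hwin, hval j hj]
        split_ifs with h1 h2 h3 <;> omega
    · rw [if_neg hcase]
      rw [hrad, hmr] at hcase
      refine ⟨hlen, by rw [hmr, hMR1]; omega, fun j hj => ?_⟩
      rw [hval j hj]
      split_ifs with h1 h2 h3 <;> omega

-- running minimum of i - rad i over processed suffixes (A's min_left)
def pvML (l : List Char) : Nat → Nat
  | 0 => l.length - 1
  | n + 1 => min (pvML l n) ((l.length - (n + 1)) - pvRad l (l.length - (n + 1)))

lemma pvML_le (l : List Char) : ∀ n, pvML l n ≤ l.length - 1 := by
  intro n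
  induction n with
  | zero => exact le_refl _
  | succ n ih => exact le_trans (min_le_left _ _) ih

lemma pvML_lb (l : List Char) (x : Nat) :
    ∀ n, l.length - n ≤ x → x ≤ l.length - 1 → pvML l n ≤ x - pvRad l x := by
  intro n
  induction n with
  | zero =>
    intro h1 h2
    have h0 : pvML l 0 = l.length - 1 := rfl
    omega
  | succ n ih =>
    intro h1 h2
    rcases Nat.lt_or_ge x (l.length - n) with h'|h'
    · have hx : x = l.length - (n + 1) := by omega
      subst hx
      exact min_le_right _ _
    · exact le_trans (min_le_left _ _) (ih h' h2)

def pvRSt (l : List Char) (pArr : List Nat) (n : Nat) : List Nat × Nat :=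
  ((List.range' (l.length - n) n).reverse).foldl (fun st i =>
      let pi := pArr.getD i 0
      if i - pi < st.2 then
        ((((List.range' (i - pi) (st.2 - (i - pi))).reverse).foldl
            (fun L j => L.set j (i - j)) st.1), i - pi)
      else st)
    (List.replicate l.length 0, l.length - 1)

lemma pvRSt_eq_rightFill (l : List Char) (pArr : List Nat) :
    pvRightFill l.length pArr = (pvRSt l pArr l.length).1 := by
  unfold pvRightFill pvRSt
  rw [List.range_eq_range', Nat.sub_self]

lemma pvRSt_succ (l : List Char) (pArr : List Nat) (n : Nat) (hn : n + 1 ≤ l.length) :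
    pvRSt l pArr (n + 1)
      = (if (l.length - (n + 1)) - pArr.getD (l.length - (n + 1)) 0 < (pvRSt l pArr n).2 then
          ((((List.range' ((l.length - (n + 1)) - pArr.getD (l.length - (n + 1)) 0)
                ((pvRSt l pArr n).2 - ((l.length - (n + 1)) - pArr.getD (l.length - (n + 1)) 0))).reverse).foldl
              (fun L j => L.set j ((l.length - (n + 1)) - j)) (pvRSt l pArr n).1),
            (l.length - (n + 1)) - pArr.getD (l.length - (n + 1)) 0)
        else pvRSt l pArr n) := by
  unfold pvRSt
  have h1 : l.length - (n + 1) + 1 = l.length - n := by omega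
  rw [List.range'_succ, h1, List.reverse_cons, List.foldl_append]
  rfl

lemma pvRightFill_inv (l : List Char) (pArr : List Nat)
    (hpa : ∀ x, x < l.length → pArr.getD x 0 = pvRad l x) :
    ∀ n, n ≤ l.length →
    (pvRSt l pArr n).1.length = l.length ∧ (pvRSt l pArr n).2 = pvML l n ∧
    ∀ j, j < l.length → (pvRSt l pArr n).1.getD j 0
      = if pvML l n ≤ j ∧ j + 1 < l.length then pvFR l j (l.length - 1) - j else 0 := by
  intro n
  induction n with
  | zero =>
    intro _
    refine ⟨by simp [pvRSt], rfl, fun j hj => ?_⟩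
    have h0 : pvML l 0 = l.length - 1 := rfl
    rw [h0, if_neg (by omega)]
    simp [pvRSt]
  | succ n ih =>
    intro hn
    obtain ⟨hlen, hml, hval⟩ := ih (by omega)
    have hrad : pArr.getD (l.length - (n + 1)) 0 = pvRad l (l.length - (n + 1)) :=
      hpa _ (by omega)
    have hML1 : pvML l (n + 1)
        = min (pvML l n) ((l.length - (n + 1)) - pvRad l (l.length - (n + 1))) := rfl
    have hMLle : pvML l n ≤ l.length - 1 := pvML_le l n
    rw [pvRSt_succ l pArr n hn]
    by_cases hcase : (l.length - (n + 1)) - pArr.getD (l.length - (n + 1)) 0 < (pvRSt l pArr n).2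
    · rw [if_pos hcase]
      rw [hrad, hml] at hcase
      obtain ⟨hsflen, hsfval⟩ := pvSetFoldR (fun j => (l.length - (n + 1)) - j)
        ((pvRSt l pArr n).2 - ((l.length - (n + 1)) - pArr.getD (l.length - (n + 1)) 0))
        ((l.length - (n + 1)) - pArr.getD (l.length - (n + 1)) 0)
        (pvRSt l pArr n).1
        (by rw [hlen, hml, hrad]; omega)
      rw [hlen] at hsflen
      refine ⟨hsflen, by rw [hrad, hML1]; omega, fun j hj => ?_⟩
      rw [hsfval j]
      rw [hrad, hml] at *
      by_cases hwin : (l.length - (n + 1)) - pvRad l (l.length - (n + 1)) ≤ j ∧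
          j < (l.length - (n + 1)) - pvRad l (l.length - (n + 1)) +
            (pvML l n - ((l.length - (n + 1)) - pvRad l (l.length - (n + 1))))
      · rw [if_pos hwin]
        have hFR : pvFR l j (l.length - 1) = l.length - (n + 1) := by
          apply pvFR_eq l j (l.length - 1) (l.length - (n + 1)) (by omega) (by omega)
          intro x hx1 hx2
          have := pvML_lb l x n (by omega) hx1
          omega
        rw [if_pos (show pvML l (n + 1) ≤ j ∧ j + 1 < l.length by rw [hML1]; omega), hFR]
      · rw [if_neg hwin, hval j hj]
        rw [hML1]
        split_ifs with h1 h2 h3 <;> omega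
    · rw [if_neg hcase]
      rw [hrad, hml] at hcase
      refine ⟨hlen, by rw [hml, hML1]; omega, fun j hj => ?_⟩
      rw [hval j hj, hML1]
      split_ifs with h1 h2 h3 <;> omega

lemma pvMapRange_getD (m : Nat) (f : Nat → Nat) (x : Nat) (hx : x < m) :
    ((List.range m).map f).getD x 0 = f x := by
  rw [List.getD_eq_getElem?_getD, List.getElem?_map, List.getElem?_range hx]
  rfl

lemma pvFindR_eq_pvFR (l : List Char) (rad : List Nat)
    (hra : ∀ x, x < l.length → rad.getD x 0 = pvRad l x) (j c : Nat) (hc : c < l.length) :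
    pvFindR rad j c = pvFR l j c := by
  have hs := pvFindR_spec rad j c
  apply (pvFR_eq l j c (pvFindR rad j c) hs.1 ?_ ?_).symm
  · rw [← hra _ (by omega)]
    exact hs.2.1
  · intro x hx1 hx2
    have := hs.2.2 x hx1 hx2
    rw [hra x (by omega)] at this
    exact this

lemma pvLeft_final (l : List Char) (pArr : List Nat)
    (hpa : ∀ x, x < l.length → pArr.getD x 0 = pvRad l x) (j : Nat) (hj : j < l.length) :
    (pvLeftFill l.length pArr).getD j 0 = j - pvFL l j 0 := by
  rw [pvLSt_eq_leftFill]
  have h := (pvLeftFill_inv l pArr hpa l.length (le_refl _)).2.2 j hj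
  rw [h]
  rcases Nat.eq_zero_or_pos j with h0|h0
  · subst h0
    rw [if_neg (by omega)]
    omega
  · have hMR := pvMR_ge l (l.length - 1) l.length (by omega)
    rw [if_pos ⟨h0, by omega⟩]

lemma pvRight_final (l : List Char) (pArr : List Nat)
    (hpa : ∀ x, x < l.length → pArr.getD x 0 = pvRad l x) (j : Nat) (hj : j < l.length) :
    (pvRightFill l.length pArr).getD j 0 = pvFR l j (l.length - 1) - j := by
  rw [pvRSt_eq_rightFill]
  have h := (pvRightFill_inv l pArr hpa l.length (le_refl _)).2.2 j hj
  have hml0 : pvML l l.length = 0 := by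
    have hm : l.length = (l.length - 1) + 1 := by omega
    conv_lhs => rw [hm]
    show min (pvML l (l.length - 1)) ((l.length - ((l.length - 1) + 1)) - pvRad l (l.length - ((l.length - 1) + 1))) = 0
    have e : l.length - ((l.length - 1) + 1) = 0 := by omega
    rw [e]
    simp [pvRad_zero]
  rw [h, hml0]
  rcases Nat.lt_or_ge (j + 1) l.length with hj1|hj1
  · rw [if_pos ⟨by omega, hj1⟩]
  · have hje : j = l.length - 1 := by omega
    rw [if_neg (by omega)]
    subst hje
    rw [pvFR, dif_neg (by omega)]
    omega

lemma pvFoldlIfMax (c : Nat → Prop) [DecidablePred c] (v : Nat → Nat) :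
    ∀ (xs : List Nat) (a : Nat),
    xs.foldl (fun acc i => if c i then max acc (v i) else acc) a
      = (xs.filterMap (fun i => if c i then some (v i) else none)).foldl max a := by
  intro xs
  induction xs with
  | nil => intro a; rfl
  | cons x xs ih =>
    intro a
    simp only [List.foldl_cons, List.filterMap_cons]
    by_cases h : c x
    · simp only [if_pos h]
      rw [ih, List.foldl_cons]
    · simp only [if_neg h]
      rw [ih]

lemma pvFoldlMaxZero (xs : List Nat) :
    xs.foldl max 0 = (match xs with | [] => 0 | h :: t => t.foldl max h) := by
  cases xs with
  | nil => rfl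
  | cons h t =>
    show t.foldl max (max 0 h) = t.foldl max h
    rw [Nat.zero_max]

lemma pvAns (LA RA LB RB : List Nat) (idxs : List Nat)
    (hL : ∀ i ∈ idxs, LA.getD i 0 = LB.getD i 0)
    (hR : ∀ i ∈ idxs, RA.getD i 0 = RB.getD i 0) :
    idxs.foldl (fun a i => if 0 < LA.getD i 0 ∧ 0 < RA.getD i 0
        then max a (LA.getD i 0 + RA.getD i 0) else a) 0
      = (match idxs.filterMap (fun i => if 0 < LB.getD i 0 ∧ 0 < RB.getD i 0
          then some (LB.getD i 0 + RB.getD i 0) else none) with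
         | [] => 0
         | h :: t => t.foldl max h) := by
  rw [pvFoldlIfMax (fun i => 0 < LA.getD i 0 ∧ 0 < RA.getD i 0) (fun i => LA.getD i 0 + RA.getD i 0)]
  rw [List.filterMap_congr (fun i hi => by rw [hL i hi, hR i hi])]
  exact pvFoldlMaxZero _

lemma pvMain_eq (s : String) : longest_double_palindrome s = longest_double_palindrome_alt s := by
  unfold longest_double_palindrome longest_double_palindrome_alt
  by_cases hn : s.toList.length ≤ 1
  · simp only [if_pos hn]
  · simp only [if_neg hn]
    have hm1 : 1 ≤ (pvProcessed s).length := by simp [pvProcessed]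
    set l := pvProcessed s with hlct
    have hpa : ∀ x, x < l.length → (pvManacher l l.length).getD x 0 = pvRad l x :=
      fun x hx => pvManacher_getD l x hx
    have hra : ∀ x, x < l.length →
        ((List.range l.length).map (fun c => pvExpandB l l.length c 0)).getD x 0 = pvRad l x := by
      intro x hx
      rw [pvMapRange_getD l.length _ x hx, pvExpandB_eq_rad]
    have hidx : ∀ i ∈ List.range' 1 ((l.length - 1) / 2) 2, i < l.length := by
      intro i hi
      rw [List.mem_range'] at hi
      obtain ⟨k, hk, rfl⟩ := hi
      omega
    have hL : ∀ i ∈ List.range' 1 ((l.length - 1) / 2) 2,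
        (pvLeftFill l.length (pvManacher l l.length)).getD i 0
          = ((List.range l.length).map (fun j =>
              j - pvFindL ((List.range l.length).map (fun c => pvExpandB l l.length c 0)) j 0)).getD i 0 := by
      intro i hi
      rw [pvLeft_final l _ hpa i (hidx i hi), pvMapRange_getD l.length _ i (hidx i hi),
        pvFindL_eq_pvFL l _ hra i (hidx i hi)]
    have hR : ∀ i ∈ List.range' 1 ((l.length - 1) / 2) 2,
        (pvRightFill l.length (pvManacher l l.length)).getD i 0
          = ((List.range l.length).map (fun j =>
              pvFindR ((List.range l.length).map (fun c => pvExpandB l l.length c 0)) j (l.length - 1) - j)).getD i 0 := by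
      intro i hi
      rw [pvRight_final l _ hpa i (hidx i hi), pvMapRange_getD l.length _ i (hidx i hi),
        pvFindR_eq_pvFR l _ hra i (l.length - 1) (by omega)]
    have key := pvAns (pvLeftFill l.length (pvManacher l l.length))
      (pvRightFill l.length (pvManacher l l.length))
      ((List.range l.length).map (fun j =>
          j - pvFindL ((List.range l.length).map (fun c => pvExpandB l l.length c 0)) j 0))
      ((List.range l.length).map (fun j =>
          pvFindR ((List.range l.length).map (fun c => pvExpandB l l.length c 0)) j (l.length - 1) - j))
      (List.range' 1 ((l.length - 1) / 2) 2) hL hR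
    rcases hc : (List.range' 1 ((l.length - 1) / 2) 2).filterMap
        (fun i => if 0 < ((List.range l.length).map (fun j =>
              j - pvFindL ((List.range l.length).map (fun c => pvExpandB l l.length c 0)) j 0)).getD i 0 ∧
            0 < ((List.range l.length).map (fun j =>
              pvFindR ((List.range l.length).map (fun c => pvExpandB l l.length c 0)) j (l.length - 1) - j)).getD i 0
          then some (((List.range l.length).map (fun j =>
              j - pvFindL ((List.range l.length).map (fun c => pvExpandB l l.length c 0)) j 0)).getD i 0 +
            ((List.range l.length).map (fun j =>
              pvFindR ((List.range l.length).map (fun c => pvExpandB l l.length c 0)) j (l.length - 1) - j)).getD i 0)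
          else none) with _ | ⟨h, t⟩
    · rw [hc] at key
      rw [key]
      rfl
    · rw [hc] at key
      rw [key]

-- ===== VERDICT (by name: the statement is the Claim_ definition above) =====
theorem longest_double_palindrome_spec : Claim_equal_longest_double_palindrome := by
  intro s _
  exact pvMain_eq s
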